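-- pv_equiv track=rewrite | github.com/AlokDebnath/Megathon18 | app/main.py | score_2_list
-- ===== SOURCE A (Python) =====
-- def score_2_list(nounlist1, nounlist2):
--     score = 0
--     nounhash = {}
--     for noun in nounlist1:
--         if noun not in nounhash.keys():
--             nounhash[noun] = 1
--         else:
--             nounhash[noun] += 1
--     for noun in nounlist2:
--         if noun not in nounhash.keys():
--             nounhash[noun] = 1
--         else:
--             nounhash[noun] += 1
--     for i in nounhash.keys():
--         if nounhash[i] > 1:
--             score += 1
--     return score
-- ===== SOURCE B (Python) =====
-- def score_2_list(nounlist1, nounlist2):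
--     seen = set()
--     dups = set()
--     for noun in nounlist1 + nounlist2:
--         if noun in seen:
--             dups.add(noun)
--         else:
--             seen.add(noun)
--     return len(dups)
-- ===== Notes on version B (the rewrite author's own statement) =====
-- stated objective: simpler
-- what changed: Replaces A's three loops (build a noun->count dict over each list, then scan the dict for counts > 1) by a single pass over the concatenated lists maintaining two sets, seen and dups, returning len(dups); no counts are kept and the threshold scan disappears.
import Mathlib
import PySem

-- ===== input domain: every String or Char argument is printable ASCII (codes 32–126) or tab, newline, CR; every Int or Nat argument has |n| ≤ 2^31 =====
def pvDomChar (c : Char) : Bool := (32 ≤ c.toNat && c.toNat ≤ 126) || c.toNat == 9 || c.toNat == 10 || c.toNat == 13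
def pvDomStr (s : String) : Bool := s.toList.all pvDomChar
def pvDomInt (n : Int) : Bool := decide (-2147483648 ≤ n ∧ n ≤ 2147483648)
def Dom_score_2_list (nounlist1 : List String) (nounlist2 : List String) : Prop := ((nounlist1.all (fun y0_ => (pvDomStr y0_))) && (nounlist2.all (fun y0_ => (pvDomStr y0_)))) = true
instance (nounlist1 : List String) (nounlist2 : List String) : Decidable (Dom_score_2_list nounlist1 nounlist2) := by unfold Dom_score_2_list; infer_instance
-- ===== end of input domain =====

-- B replaces A's count dictionary and final threshold scan by one pass over both
-- lists maintaining two sets (seen, dups) and returning |dups| (objective: simpler).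

-- ===== PORT A =====
def score_2_list (nounlist1 : List String) (nounlist2 : List String) : Int :=
  let score : Int := 0
  let nounhash : PySem.Dict String Int := PySem.Dict.empty
  let nounhash := nounlist1.foldl (fun nounhash noun =>
    if nounhash.contains noun = false then nounhash.insert noun 1
    else nounhash.modify noun 0 (· + 1)) nounhash
  let nounhash := nounlist2.foldl (fun nounhash noun =>
    if nounhash.contains noun = false then nounhash.insert noun 1
    else nounhash.modify noun 0 (· + 1)) nounhash
  nounhash.keys.foldl (fun score i => if nounhash.getD i 0 > 1 then score + 1 else score) score

-- ===== PORT B =====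
def score_2_list_alt (nounlist1 : List String) (nounlist2 : List String) : Int :=
  let st := (nounlist1 ++ nounlist2).foldl
    (fun (st : PySem.Set String × PySem.Set String) noun =>
      if PySem.Set.contains st.1 noun then (st.1, PySem.Set.add st.2 noun)
      else (PySem.Set.add st.1 noun, st.2))
    (PySem.Set.empty, PySem.Set.empty)
  (PySem.Set.len st.2 : Int)

-- ===== PRECONDITION & SPEC =====
def Spec_score_2_list (nounlist1 : List String) (nounlist2 : List String) (out : Int) : Prop := out = score_2_list_alt nounlist1 nounlist2
instance (nounlist1 : List String) (nounlist2 : List String) (out : Int) : Decidable (Spec_score_2_list nounlist1 nounlist2 out) := by unfold Spec_score_2_list; infer_instance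

-- ===== CLAIM (what is proved, stated in full; the proofs are below) =====
def Claim_equal_score_2_list : Prop := ∀ (nounlist1 : List String) (nounlist2 : List String), Dom_score_2_list nounlist1 nounlist2 → Spec_score_2_list nounlist1 nounlist2 (score_2_list nounlist1 nounlist2)

-- ===== LEMMAS AND PROOFS =====

-- A's per-element update (insert 1 on a fresh key, else += 1) is exactly Counter's update.
lemma score2_body_eq (d : PySem.Dict String Int) (x : String) :
    (if d.contains x = false then d.insert x 1 else d.modify x 0 (· + 1))
      = d.modify x 0 (· + 1) := by
  by_cases h : d.contains x = false
  · simp [h, PySem.Dict.modify, PySem.Dict.getD_of_not_contains d 0 h]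
  · simp [h]

-- A equals: count the distinct nouns of the combined list whose multiplicity exceeds 1.
lemma score2_A_char (l1 l2 : List String) :
    score_2_list l1 l2
      = ((PySem.Set.ofList (l1 ++ l2)).countP
          (fun y => decide ((1 : Int) < ((l1 ++ l2).count y : Int))) : Int) := by
  unfold score_2_list
  simp only [funext (fun d => funext (fun x => score2_body_eq d x))]
  rw [← List.foldl_append, ← PySem.Dict.counter_eq_foldl]
  rw [PySem.List.foldl_ite_add_one]
  simp [PySem.Dict.keys_counter, PySem.Dict.getD_counter]

-- the invariant of B's single pass: (seen, dups) after consuming xs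
lemma score2_B_loop (xs : List String) : ∀ (seen dups : List String),
    (∀ y, y ∈ (xs.foldl
        (fun (st : PySem.Set String × PySem.Set String) noun =>
          if PySem.Set.contains st.1 noun then (st.1, PySem.Set.add st.2 noun)
          else (PySem.Set.add st.1 noun, st.2)) (seen, dups)).2
      ↔ y ∈ dups ∨ (y ∈ seen ∧ y ∈ xs) ∨ 2 ≤ xs.count y)
    ∧ (dups.Nodup → (xs.foldl
        (fun (st : PySem.Set String × PySem.Set String) noun =>
          if PySem.Set.contains st.1 noun then (st.1, PySem.Set.add st.2 noun)
          else (PySem.Set.add st.1 noun, st.2)) (seen, dups)).2.Nodup) := by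
  induction xs with
  | nil => intro seen dups; simp
  | cons x rest ih =>
    intro seen dups
    by_cases hx : x ∈ seen
    · have hc : PySem.Set.contains seen x = true := (PySem.Set.contains_iff seen x).mpr hx
      constructor
      · intro y
        rw [List.foldl_cons]
        simp only [hc, if_true]
        rw [(ih seen (PySem.Set.add dups x)).1 y, PySem.Set.mem_add]
        by_cases hyx : y = x
        · subst hyx
          simp [hx, List.count_cons_self]
        · have hcnt : List.count y (x :: rest) = List.count y rest := by
            simp [Ne.symm hyx]
          have hm : (y ∈ x :: rest) = (y ∈ rest) := by simp [hyx]
          rw [hcnt, hm]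
          tauto
      · intro hnd
        rw [List.foldl_cons]
        simp only [hc, if_true]
        exact (ih seen (PySem.Set.add dups x)).2 (PySem.Set.nodup_add dups x hnd)
    · have hc : PySem.Set.contains seen x = false := by
        cases h : PySem.Set.contains seen x
        · rfl
        · exact absurd ((PySem.Set.contains_iff seen x).mp h) hx
      constructor
      · intro y
        rw [List.foldl_cons]
        simp only [hc, Bool.false_eq_true, if_false]
        rw [(ih (PySem.Set.add seen x) dups).1 y, PySem.Set.mem_add]
        by_cases hyx : y = x
        · subst hyx
          simp only [hx, List.count_cons_self, List.mem_cons, false_or, true_and,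
            false_and]
          constructor
          · rintro (h | h | h)
            · exact Or.inl h
            · exact Or.inr (by have := List.one_le_count_iff.mpr h; omega)
            · exact Or.inr (by omega)
          · rintro (h | h)
            · exact Or.inl h
            · exact Or.inr (Or.inl (List.one_le_count_iff.mp (by omega)))
        · have hcnt : List.count y (x :: rest) = List.count y rest := by
            simp [Ne.symm hyx]
          have hm : (y ∈ x :: rest) = (y ∈ rest) := by simp [hyx]
          rw [hcnt, hm]
          constructor
          · rintro (h | ⟨h1 | h1, h2⟩ | h)
            · exact Or.inl h
            · exact Or.inr (Or.inl ⟨h1, h2⟩)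
            · exact absurd h1 hyx
            · exact Or.inr (Or.inr h)
          · tauto
      · intro hnd
        rw [List.foldl_cons]
        simp only [hc, Bool.false_eq_true, if_false]
        exact (ih (PySem.Set.add seen x) dups).2 hnd

-- B equals the same count.
lemma score2_B_char (l1 l2 : List String) :
    score_2_list_alt l1 l2
      = ((PySem.Set.ofList (l1 ++ l2)).countP
          (fun y => decide ((1 : Int) < ((l1 ++ l2).count y : Int))) : Int) := by
  unfold score_2_list_alt
  set xs := l1 ++ l2 with hxs
  obtain ⟨hmem, hnd⟩ := score2_B_loop xs [] []
  have hnd' := hnd List.nodup_nil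
  have hperm : (xs.foldl
        (fun (st : PySem.Set String × PySem.Set String) noun =>
          if PySem.Set.contains st.1 noun then (st.1, PySem.Set.add st.2 noun)
          else (PySem.Set.add st.1 noun, st.2)) ([], [])).2.Perm
      ((PySem.Set.ofList xs).filter (fun y => decide ((1 : Int) < (xs.count y : Int)))) := by
    apply (List.perm_ext_iff_of_nodup hnd' ((PySem.Set.nodup_ofList xs).filter _)).mpr
    intro y
    rw [List.mem_filter, PySem.Set.mem_ofList]
    rw [hmem y]
    constructor
    · intro h
      rcases h with h | h | h
      · exact absurd h (List.not_mem_nil)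
      · exact absurd h.1 (List.not_mem_nil)
      · refine ⟨List.one_le_count_iff.mp (by omega), by simp; exact_mod_cast (by omega : (2:Int) ≤ (xs.count y : Int))⟩
    · intro ⟨hy, hcnt⟩
      simp at hcnt
      exact Or.inr (Or.inr (by exact_mod_cast hcnt))
  simp only [PySem.Set.empty, PySem.Set.len]
  rw [hperm.length_eq, ← List.countP_eq_length_filter]

-- ===== VERDICT (by name: the statement is the Claim_ definition above) =====
theorem score_2_list_spec : Claim_equal_score_2_list := by
  intro l1 l2 _
  unfold Spec_score_2_list
  rw [score2_A_char, score2_B_char]
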